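-- pv_equiv track=rewrite | github.com/ZZR8066/SEMv2 | SEMv2/libs/data/utils.py | cal_fg_bg_span
-- ===== SOURCE A (Python) =====
-- def cal_fg_bg_span(spans, edge):
--     num_span = len(spans)
--     bg_spans = list()
--     for idx in range(num_span):
--         if spans[idx] is None:
--             continue
--         if idx == 0:
--             if spans[idx][0] <= 0:
--                 continue
--         else:
--             if spans[idx-1] is None:
--                 continue
--             if spans[idx][0] <= spans[idx-1][1]:
--                 continue
--         if idx == num_span - 1:
--             if spans[idx][1] >= edge:
--                 continue
--         else:
--             if spans[idx+1] is None:
--                 continue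
--             if spans[idx][1] >= spans[idx+1][0]:
--                 continue
--
--         bg_spans.append(spans[idx])
--
--     fg_spans = list()
--     for idx in range(num_span+1):
--         if idx == 0:
--             s = 0
--         else:
--             if spans[idx-1] is None:
--                 continue
--             s = spans[idx-1][1]
--
--         if idx == num_span:
--             e = edge
--         else:
--             if spans[idx] is None:
--                 continue
--             e = spans[idx][0]
--
--         if e <= s:
--             continue
--
--         fg_spans.append([s, e])
--
--     return fg_spans, bg_spans
-- ===== SOURCE B (Python) =====
-- def cal_fg_bg_span(spans, edge):
--     n = len(spans)
--     fg_spans = []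
--     gap_at = set()
--     for idx in range(n + 1):
--         left = spans[idx - 1] if idx > 0 else None
--         right = spans[idx] if idx < n else None
--         if idx > 0 and left is None:
--             continue
--         if idx < n and right is None:
--             continue
--         s = 0 if idx == 0 else left[1]
--         e = edge if idx == n else right[0]
--         if s < e:
--             fg_spans.append([s, e])
--             gap_at.add(idx)
--     # a span is isolated background exactly when a foreground gap borders it on both sides
--     bg_spans = [spans[idx] for idx in range(n) if idx in gap_at and idx + 1 in gap_at]
--     return fg_spans, bg_spans
-- ===== Notes on version B (the rewrite author's own statement) =====
-- stated objective: alternative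
-- what changed: B runs a single boundary loop that builds the foreground gaps while recording which boundaries have a gap in a set, then derives bg_spans in one comprehension as the spans bordered by a gap on both sides, replacing A's second full loop with its duplicated None/adjacency tests.
import Mathlib
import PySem

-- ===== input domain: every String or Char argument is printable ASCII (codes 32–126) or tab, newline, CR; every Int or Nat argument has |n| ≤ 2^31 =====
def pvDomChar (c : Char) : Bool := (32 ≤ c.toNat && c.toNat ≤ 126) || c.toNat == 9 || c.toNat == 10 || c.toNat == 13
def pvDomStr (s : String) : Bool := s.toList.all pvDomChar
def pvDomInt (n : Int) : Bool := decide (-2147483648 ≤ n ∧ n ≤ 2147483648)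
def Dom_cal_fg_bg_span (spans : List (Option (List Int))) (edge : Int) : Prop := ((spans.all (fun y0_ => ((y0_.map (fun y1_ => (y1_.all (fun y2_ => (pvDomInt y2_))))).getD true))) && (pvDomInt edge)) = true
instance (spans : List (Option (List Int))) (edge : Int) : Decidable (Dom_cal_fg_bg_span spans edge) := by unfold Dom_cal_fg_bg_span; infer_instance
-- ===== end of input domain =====

-- B replaces A's second loop (with its duplicated None/adjacency tests) by one boundary loop that
-- records gap positions in a set and a comprehension picking spans bordered by gaps on both sides
-- (objective: alternative decomposition, same O(n) cost).

-- ===== PORT A =====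
-- l[i] for the 0/1 indices of a span; exact under Pre_ (every non-None span has length ≥ 2,
-- Python raises IndexError otherwise)
def pvAt (l : List Int) (i : Nat) : Int := l.getD i 0

-- body of A's first loop ('for idx in range(num_span)' building bg_spans); spans.getD idx none is
-- exact since idx < num_span
def pvAStepBg (spans : List (Option (List Int))) (edge : Int) (num_span : Nat)
    (bg : List (List Int)) (idx : Nat) : List (List Int) :=
  match spans.getD idx none with
  | none => bg
  | some cur =>
    let leftBad : Bool :=
      if idx = 0 then decide (pvAt cur 0 ≤ 0)
      else match spans.getD (idx - 1) none with
        | none => true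
        | some prev => decide (pvAt cur 0 ≤ pvAt prev 1)
    if leftBad then bg
    else
      let rightBad : Bool :=
        if idx = num_span - 1 then decide (pvAt cur 1 ≥ edge)
        else match spans.getD (idx + 1) none with
          | none => true
          | some nxt => decide (pvAt cur 1 ≥ pvAt nxt 0)
      if rightBad then bg else bg ++ [cur]

-- body of A's second loop ('for idx in range(num_span+1)' building fg_spans)
def pvAStepFg (spans : List (Option (List Int))) (edge : Int) (num_span : Nat)
    (fg : List (List Int)) (idx : Nat) : List (List Int) :=
  let s? : Option Int :=
    if idx = 0 then some 0
    else match spans.getD (idx - 1) none with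
      | none => none
      | some prev => some (pvAt prev 1)
  match s? with
  | none => fg
  | some s =>
    let e? : Option Int :=
      if idx = num_span then some edge
      else match spans.getD idx none with
        | none => none
        | some cur => some (pvAt cur 0)
    match e? with
    | none => fg
    | some e => if e ≤ s then fg else fg ++ [[s, e]]

def cal_fg_bg_span (spans : List (Option (List Int))) (edge : Int) :
    List (List Int) × List (List Int) :=
  let num_span := spans.length
  let bg_spans := (List.range num_span).foldl (pvAStepBg spans edge num_span) []
  let fg_spans := (List.range (num_span + 1)).foldl (pvAStepFg spans edge num_span) []
  (fg_spans, bg_spans)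

-- ===== PORT B =====
-- body of B's single boundary loop: state = (fg_spans, gap_at)
def pvBStep (spans : List (Option (List Int))) (edge : Int) (n : Nat)
    (st : List (List Int) × PySem.Set Nat) (idx : Nat) : List (List Int) × PySem.Set Nat :=
  let left : Option (List Int) := if 0 < idx then spans.getD (idx - 1) none else none
  let right : Option (List Int) := if idx < n then spans.getD idx none else none
  if 0 < idx ∧ left = none then st
  else if idx < n ∧ right = none then st
  else
    let s := if idx = 0 then 0 else pvAt (left.getD []) 1
    let e := if idx = n then edge else pvAt (right.getD []) 0
    if s < e then (st.1 ++ [[s, e]], PySem.Set.add st.2 idx) else st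

def cal_fg_bg_span_alt (spans : List (Option (List Int))) (edge : Int) :
    List (List Int) × List (List Int) :=
  let n := spans.length
  let st := (List.range (n + 1)).foldl (pvBStep spans edge n) ([], PySem.Set.empty)
  -- the comprehension; the filterMap's 'none' case is unreachable (membership of idx+1 in gap_at
  -- implies spans[idx] is not None), so this is exactly '[spans[idx] for idx in range(n) if …]'
  let bg := (List.range n).filterMap (fun idx =>
    if idx ∈ st.2 ∧ (idx + 1) ∈ st.2 then spans.getD idx none else none)
  (st.1, bg)

-- ===== PRECONDITION & SPEC =====
-- Pre_ excludes exactly the inputs where Python A raises IndexError: a non-None span with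
-- fewer than two elements (spans[idx][1] / spans[idx][0] out of range).
def Pre_cal_fg_bg_span (spans : List (Option (List Int))) (edge : Int) : Prop :=
  (spans.all (fun o => (o.map (fun l => decide (2 ≤ l.length))).getD true)) = true
instance (spans : List (Option (List Int))) (edge : Int) : Decidable (Pre_cal_fg_bg_span spans edge) := by unfold Pre_cal_fg_bg_span; infer_instance

def pvWitness_cal_fg_bg_span : List (Option (List Int)) × Int := ([some [1, 2], none, some [4, 6]], 9)

def Spec_cal_fg_bg_span (spans : List (Option (List Int))) (edge : Int) (out : List (List Int) × List (List Int)) : Prop := out = cal_fg_bg_span_alt spans edge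
instance (spans : List (Option (List Int))) (edge : Int) (out : List (List Int) × List (List Int)) : Decidable (Spec_cal_fg_bg_span spans edge out) := by unfold Spec_cal_fg_bg_span; infer_instance

-- ===== CLAIM (what is proved, stated in full; the proofs are below) =====
def Claim_equal_cal_fg_bg_span : Prop := ∀ (spans : List (Option (List Int))) (edge : Int), Dom_cal_fg_bg_span spans edge → Pre_cal_fg_bg_span spans edge → Spec_cal_fg_bg_span spans edge (cal_fg_bg_span spans edge)

-- ===== LEMMAS AND PROOFS =====

-- the gap test of pvBStep, as a standalone Bool
def pvGap (spans : List (Option (List Int))) (edge : Int) (n : Nat) (idx : Nat) : Bool :=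
  let left : Option (List Int) := if 0 < idx then spans.getD (idx - 1) none else none
  let right : Option (List Int) := if idx < n then spans.getD idx none else none
  if 0 < idx ∧ left = none then false
  else if idx < n ∧ right = none then false
  else
    let s := if idx = 0 then 0 else pvAt (left.getD []) 1
    let e := if idx = n then edge else pvAt (right.getD []) 0
    decide (s < e)

-- the (s, e) pair pvBStep would append at boundary idx
def pvSE (spans : List (Option (List Int))) (edge : Int) (n : Nat) (idx : Nat) : Int × Int :=
  (if idx = 0 then 0 else pvAt ((spans.getD (idx - 1) none).getD []) 1,
   if idx = n then edge else pvAt ((spans.getD idx none).getD []) 0)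

set_option maxHeartbeats 1600000 in
lemma pvBStep_shape (spans : List (Option (List Int))) (edge : Int) (n : Nat)
    (st : List (List Int) × PySem.Set Nat) (idx : Nat) (hidx : idx < n + 1) :
    pvBStep spans edge n st idx =
      if pvGap spans edge n idx = true then
        (st.1 ++ [[(pvSE spans edge n idx).1, (pvSE spans edge n idx).2]], PySem.Set.add st.2 idx)
      else st := by
  unfold pvBStep pvGap pvSE
  by_cases h0 : idx = 0 <;> split_ifs <;> simp_all <;> omega

set_option maxHeartbeats 1600000 in
lemma pvBStep_fst (spans : List (Option (List Int))) (edge : Int) (n : Nat)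
    (st : List (List Int) × PySem.Set Nat) (idx : Nat) (hidx : idx < n + 1) :
    (pvBStep spans edge n st idx).1 = pvAStepFg spans edge n st.1 idx := by
  unfold pvBStep pvAStepFg
  by_cases h0 : idx = 0 <;> by_cases hn : idx = n <;>
    rcases hl : spans.getD (idx - 1) none with _ | prev <;>
    rcases hr : spans.getD idx none with _ | cur <;>
    simp_all <;> split_ifs <;> simp_all <;> omega

lemma pvFold_fst (spans : List (Option (List Int))) (edge : Int) (n : Nat)
    (l : List Nat) (hl : ∀ x ∈ l, x < n + 1) (st : List (List Int) × PySem.Set Nat) :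
    (l.foldl (pvBStep spans edge n) st).1 = l.foldl (pvAStepFg spans edge n) st.1 := by
  induction l generalizing st with
  | nil => rfl
  | cons x xs ih =>
    simp only [List.foldl_cons]
    rw [ih (fun y hy => hl y (List.mem_cons_of_mem _ hy)),
        pvBStep_fst spans edge n st x (hl x List.mem_cons_self)]

lemma pvFold_mem (spans : List (Option (List Int))) (edge : Int) (n : Nat)
    (l : List Nat) (hl : ∀ x ∈ l, x < n + 1) (st : List (List Int) × PySem.Set Nat) (j : Nat) :
    j ∈ (l.foldl (pvBStep spans edge n) st).2 ↔
      j ∈ st.2 ∨ (j ∈ l ∧ pvGap spans edge n j = true) := by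
  induction l generalizing st with
  | nil => simp
  | cons x xs ih =>
    simp only [List.foldl_cons,
      ih (fun y hy => hl y (List.mem_cons_of_mem _ hy)),
      pvBStep_shape spans edge n st x (hl x List.mem_cons_self)]
    split_ifs with hg
    · simp only [PySem.Set.mem_add, List.mem_cons]
      constructor
      · rintro ((h | rfl) | h)
        · exact Or.inl h
        · exact Or.inr ⟨Or.inl rfl, hg⟩
        · exact Or.inr ⟨Or.inr h.1, h.2⟩
      · rintro (h | ⟨(rfl | h), hj⟩)
        · exact Or.inl (Or.inl h)
        · exact Or.inl (Or.inr rfl)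
        · exact Or.inr ⟨h, hj⟩
    · simp only [List.mem_cons]
      constructor
      · rintro (h | h)
        · exact Or.inl h
        · exact Or.inr ⟨Or.inr h.1, h.2⟩
      · rintro (h | ⟨(rfl | h), hj⟩)
        · exact Or.inl h
        · exact (hg hj).elim
        · exact Or.inr ⟨h, hj⟩

lemma pvLeftBad (spans : List (Option (List Int))) (edge : Int) (n : Nat)
    (idx : Nat) (cur : List Int) (hidx : idx < n) (hr : spans.getD idx none = some cur) :
    (if idx = 0 then decide (pvAt cur 0 ≤ 0)
     else match spans.getD (idx - 1) none with
       | none => true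
       | some prev => decide (pvAt cur 0 ≤ pvAt prev 1)) = !pvGap spans edge n idx := by
  have hr' : spans[idx]?.getD none = some cur := by
    rw [List.getD_eq_getElem?_getD] at hr; exact hr
  unfold pvGap
  by_cases h0 : idx = 0
  · subst h0
    simp [hidx, hr']
    try (rw [← decide_not]; exact decide_eq_decide.mpr (by omega))
  · have hpos : 0 < idx := Nat.pos_of_ne_zero h0
    rcases hl : spans.getD (idx - 1) none with _ | prev <;>
      rw [List.getD_eq_getElem?_getD] at hl
    · simp [h0, hl, hpos]
    · simp [h0, hl, hr', hidx, hpos]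
      try (rw [← decide_not]; exact decide_eq_decide.mpr (by omega))

lemma pvRightBad (spans : List (Option (List Int))) (edge : Int) (n : Nat)
    (idx : Nat) (cur : List Int) (hidx : idx < n) (hr : spans.getD idx none = some cur) :
    (if idx = n - 1 then decide (pvAt cur 1 ≥ edge)
     else match spans.getD (idx + 1) none with
       | none => true
       | some nxt => decide (pvAt cur 1 ≥ pvAt nxt 0)) = !pvGap spans edge n (idx + 1) := by
  have hr' : spans[idx]?.getD none = some cur := by
    rw [List.getD_eq_getElem?_getD] at hr; exact hr
  unfold pvGap
  by_cases h1 : idx + 1 = n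
  · subst h1
    simp [hr']
    try (rw [← decide_not]; exact decide_eq_decide.mpr (by omega))
  · have hlt : idx + 1 < n := by omega
    have hne : idx ≠ n - 1 := by omega
    rcases hn2 : spans.getD (idx + 1) none with _ | nxt <;>
      rw [List.getD_eq_getElem?_getD] at hn2
    · simp [hne, hn2, hr', hlt, h1]
    · simp [hne, hn2, hr', hlt, h1]
      try (rw [← decide_not]; exact decide_eq_decide.mpr (by omega))

lemma pvAStepBg_shape (spans : List (Option (List Int))) (edge : Int) (n : Nat)
    (bg : List (List Int)) (idx : Nat) (hidx : idx < n) :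
    pvAStepBg spans edge n bg idx =
      bg ++ (if pvGap spans edge n idx = true ∧ pvGap spans edge n (idx + 1) = true then
               spans.getD idx none else none).toList := by
  unfold pvAStepBg
  rcases hr : spans.getD idx none with _ | cur
  · have hr' : spans[idx]?.getD none = none := by
      rw [List.getD_eq_getElem?_getD] at hr; exact hr
    have hng : pvGap spans edge n idx = false := by
      unfold pvGap
      simp [hidx, hr']
    simp [hng, hr]
  · dsimp only
    rw [pvLeftBad spans edge n idx cur hidx hr, pvRightBad spans edge n idx cur hidx hr]
    rcases hg1 : pvGap spans edge n idx <;> rcases hg2 : pvGap spans edge n (idx + 1) <;>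
      simp [hg1, hg2]

theorem pv_main (spans : List (Option (List Int))) (edge : Int) :
    cal_fg_bg_span spans edge = cal_fg_bg_span_alt spans edge := by
  unfold cal_fg_bg_span cal_fg_bg_span_alt
  dsimp only
  set n := spans.length with hn
  have hbound : ∀ x ∈ List.range (n + 1), x < n + 1 := by
    intro x hx; exact List.mem_range.mp hx
  refine Prod.ext ?_ ?_
  · dsimp only
    exact (pvFold_fst spans edge n _ hbound ([], PySem.Set.empty)).symm
  · dsimp only
    have hmem : ∀ j, j ∈ ((List.range (n + 1)).foldl (pvBStep spans edge n) ([], PySem.Set.empty)).2 ↔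
        (j < n + 1 ∧ pvGap spans edge n j = true) := by
      intro j
      rw [pvFold_mem spans edge n _ hbound]
      simp [PySem.Set.empty, List.mem_range]
    have hB : (List.range n).filterMap (fun idx =>
          if idx ∈ ((List.range (n + 1)).foldl (pvBStep spans edge n) ([], PySem.Set.empty)).2 ∧
             (idx + 1) ∈ ((List.range (n + 1)).foldl (pvBStep spans edge n) ([], PySem.Set.empty)).2
          then spans.getD idx none else none) =
        (List.range n).filterMap (fun idx =>
          if pvGap spans edge n idx = true ∧ pvGap spans edge n (idx + 1) = true
          then spans.getD idx none else none) := by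
      apply List.filterMap_congr
      intro idx hidx
      rw [List.mem_range] at hidx
      simp only [hmem]
      simp [show idx < n + 1 by omega, show idx + 1 < n + 1 by omega]
    rw [hB]
    have hA : (List.range n).foldl (pvAStepBg spans edge n) [] =
        (List.range n).foldl (fun bg idx => bg ++ (if pvGap spans edge n idx = true ∧
            pvGap spans edge n (idx + 1) = true then spans.getD idx none else none).toList) [] := by
      apply PySem.List.foldl_congr_mem
      intro acc x hx
      rw [List.mem_range] at hx
      exact pvAStepBg_shape spans edge n acc x hx
    rw [hA, PySem.List.foldl_append_eq_flatMap]
    simp only [List.nil_append]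
    exact (List.filterMap_eq_flatMap_toList _ _).symm

-- ===== VERDICT (by name: the statement is the Claim_ definition above) =====
theorem cal_fg_bg_span_spec : Claim_equal_cal_fg_bg_span := by
  intro spans edge _ _
  unfold Spec_cal_fg_bg_span
  exact pv_main spans edge
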